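-- pv_equiv track=rewrite | github.com/cccorn/Q-ATPG | lib/libspd.py | infer_phase
-- ===== SOURCE A (Python) =====
-- def int2bin(x):
--     if x==0:
--         return []
--     result=[]
--     while(True):
--         if x==0:
--             break
--         else:
--             result.insert(0,x%2)
--         x=x//2
--     return result
--
-- def infer_phase(pauli1,pauli2):
--     pauli1=int2bin(pauli1)
--     pauli2=int2bin(pauli2)
--     n=((max(len(pauli1),len(pauli2))+1)//2)*2
--     pauli1=[0]*(n-len(pauli1))+pauli1
--     pauli2=[0]*(n-len(pauli2))+pauli2
--     phase=0
--     for ii in range(n//2):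
--         if pauli1[ii*2:ii*2+2]==[0,1] and pauli2[ii*2:ii*2+2]==[1,0]:
--             #ZX
--             phase+=1
--         elif pauli1[ii*2:ii*2+2]==[1,0] and pauli2[ii*2:ii*2+2]==[1,1]:
--             #XY
--             phase+=1
--         elif pauli1[ii*2:ii*2+2]==[1,1] and pauli2[ii*2:ii*2+2]==[0,1]:
--             #YZ
--             phase+=1
--         elif pauli1[ii*2:ii*2+2]==[1,0] and pauli2[ii*2:ii*2+2]==[0,1]:
--             #XZ
--             phase+=3
--         elif pauli1[ii*2:ii*2+2]==[1,1] and pauli2[ii*2:ii*2+2]==[1,0]: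
--             #YX
--             phase+=3
--         elif pauli1[ii*2:ii*2+2]==[0,1] and pauli2[ii*2:ii*2+2]==[1,1]:
--             #ZY
--             phase+=3
--     return (phase//2)%2
-- ===== SOURCE B (Python) =====
-- def infer_phase(pauli1, pauli2):
--     # Read both operators as base-4 numbers (each digit is one Pauli: 0=I,1=Z,2=X,3=Y)
--     # instead of building padded bit lists.
--     phase = 0
--     while pauli1 > 0 or pauli2 > 0:
--         d1 = pauli1 % 4
--         d2 = pauli2 % 4
--         pauli1 //= 4
--         pauli2 //= 4
--         if d1 != 0 and d2 != 0 and d1 != d2: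
--             phase += 1 if (d2 - d1) % 3 == 1 else 3
--     return (phase // 2) % 2
-- ===== Notes on version B (the rewrite author's own statement) =====
-- stated objective: simpler
-- what changed: B drops int2bin, bit-list padding and slicing entirely: it reads both integers directly as base-4 numbers, peeling one Pauli digit per step with %4 and //4 and scoring each digit pair with a single modular formula, maintaining only two shrinking integers.
import Mathlib
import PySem

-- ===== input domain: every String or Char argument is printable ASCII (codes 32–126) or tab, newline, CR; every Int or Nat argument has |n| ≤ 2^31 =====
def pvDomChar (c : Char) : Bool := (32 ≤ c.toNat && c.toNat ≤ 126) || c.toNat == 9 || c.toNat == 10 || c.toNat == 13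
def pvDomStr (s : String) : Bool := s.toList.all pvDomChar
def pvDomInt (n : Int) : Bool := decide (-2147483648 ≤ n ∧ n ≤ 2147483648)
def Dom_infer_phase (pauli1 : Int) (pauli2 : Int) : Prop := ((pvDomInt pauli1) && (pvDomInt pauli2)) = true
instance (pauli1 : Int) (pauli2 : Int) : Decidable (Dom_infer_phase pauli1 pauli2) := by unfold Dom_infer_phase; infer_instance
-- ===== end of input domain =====

-- B replaces A's bit-list construction/padding/slicing by reading both integers as base-4 Pauli digit strings (simpler; same asymptotic cost).


-- ===== PORT A =====
-- Python's int2bin loops 'result.insert(0, x%2); x //= 2' until x == 0: MSB-first bit list.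
-- (The 'x ≤ 0 → []' guard only makes the function total: Python never terminates for x < 0,
-- and those inputs are excluded by Pre_ below.)
def int2bin (x : Int) : List Int :=
  if h : 0 < x then
    int2bin (PySem.Int.floordiv x 2) ++ [PySem.Int.mod x 2]
  else []
termination_by x.toNat
decreasing_by
  rw [PySem.Int.floordiv_eq_ediv_of_pos (by omega)]
  omega

-- the body of A's 'for ii in range(n//2)' loop over the two padded bit lists
def pauliSliceStep (q1 q2 : List Int) (phase : Int) (ii : Int) : Int :=
  if PySem.List.slice q1 (some (ii*2)) (some (ii*2+2)) = [0,1] ∧ PySem.List.slice q2 (some (ii*2)) (some (ii*2+2)) = [1,0] then phase + 1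
  else if PySem.List.slice q1 (some (ii*2)) (some (ii*2+2)) = [1,0] ∧ PySem.List.slice q2 (some (ii*2)) (some (ii*2+2)) = [1,1] then phase + 1
  else if PySem.List.slice q1 (some (ii*2)) (some (ii*2+2)) = [1,1] ∧ PySem.List.slice q2 (some (ii*2)) (some (ii*2+2)) = [0,1] then phase + 1
  else if PySem.List.slice q1 (some (ii*2)) (some (ii*2+2)) = [1,0] ∧ PySem.List.slice q2 (some (ii*2)) (some (ii*2+2)) = [0,1] then phase + 3
  else if PySem.List.slice q1 (some (ii*2)) (some (ii*2+2)) = [1,1] ∧ PySem.List.slice q2 (some (ii*2)) (some (ii*2+2)) = [1,0] then phase + 3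
  else if PySem.List.slice q1 (some (ii*2)) (some (ii*2+2)) = [0,1] ∧ PySem.List.slice q2 (some (ii*2)) (some (ii*2+2)) = [1,1] then phase + 3
  else phase

def infer_phase (pauli1 : Int) (pauli2 : Int) : Int :=
  let l1 := int2bin pauli1
  let l2 := int2bin pauli2
  let n : Int := PySem.Int.floordiv (max (l1.length : Int) (l2.length : Int) + 1) 2 * 2
  let q1 := List.replicate (n - (l1.length : Int)).toNat (0 : Int) ++ l1
  let q2 := List.replicate (n - (l2.length : Int)).toNat (0 : Int) ++ l2
  let phase := (PySem.List.pyRange 0 (PySem.Int.floordiv n 2) 1).foldl (pauliSliceStep q1 q2) 0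
  PySem.Int.mod (PySem.Int.floordiv phase 2) 2

-- ===== PORT B =====
-- B's 'while pauli1 > 0 or pauli2 > 0' loop, peeling one base-4 digit per step.
def altGo (p1 p2 phase : Int) : Int :=
  if h : 0 < p1 ∨ 0 < p2 then
    let d1 := PySem.Int.mod p1 4
    let d2 := PySem.Int.mod p2 4
    altGo (PySem.Int.floordiv p1 4) (PySem.Int.floordiv p2 4)
      (if d1 ≠ 0 ∧ d2 ≠ 0 ∧ d1 ≠ d2 then
         phase + (if PySem.Int.mod (d2 - d1) 3 = 1 then 1 else 3)
       else phase)
  else phase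
termination_by p1.toNat + p2.toNat
decreasing_by
  rw [PySem.Int.floordiv_eq_ediv_of_pos (show (0:Int) < 4 by omega),
      PySem.Int.floordiv_eq_ediv_of_pos (show (0:Int) < 4 by omega)]
  omega

def infer_phase_alt (pauli1 : Int) (pauli2 : Int) : Int :=
  PySem.Int.mod (PySem.Int.floordiv (altGo pauli1 pauli2 0) 2) 2

-- ===== PRECONDITION & SPEC =====
-- Pre_ excludes negative inputs: there A's int2bin loop 'x //= 2' never reaches 0, so the
-- Python A diverges and returns nothing to match.
def Pre_infer_phase (pauli1 : Int) (pauli2 : Int) : Prop := 0 ≤ pauli1 ∧ 0 ≤ pauli2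
instance (pauli1 : Int) (pauli2 : Int) : Decidable (Pre_infer_phase pauli1 pauli2) := by unfold Pre_infer_phase; infer_instance
def pvWitness_infer_phase : Int × Int := (6, 9)

def Spec_infer_phase (pauli1 : Int) (pauli2 : Int) (out : Int) : Prop := out = infer_phase_alt pauli1 pauli2
instance (pauli1 : Int) (pauli2 : Int) (out : Int) : Decidable (Spec_infer_phase pauli1 pauli2 out) := by unfold Spec_infer_phase; infer_instance

-- ===== CLAIM (what is proved, stated in full; the proofs are below) =====
def Claim_equal_infer_phase : Prop := ∀ (pauli1 : Int) (pauli2 : Int), Dom_infer_phase pauli1 pauli2 → Pre_infer_phase pauli1 pauli2 → Spec_infer_phase pauli1 pauli2 (infer_phase pauli1 pauli2)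

-- ===== LEMMAS AND PROOFS =====

-- B's per-digit phase contribution as a function (0 when the digits are equal or one is identity)
def f4 (d1 d2 : Int) : Int :=
  if d1 ≠ 0 ∧ d2 ≠ 0 ∧ d1 ≠ d2 then (if PySem.Int.mod (d2 - d1) 3 = 1 then 1 else 3) else 0

-- A's zero-padding of int2bin x to length m
def pad (m : Nat) (x : Int) : List Int := List.replicate (m - (int2bin x).length) 0 ++ int2bin x

theorem int2bin_nonpos (x : Int) (h : x ≤ 0) : int2bin x = [] := by
  rw [int2bin]; simp [show ¬ 0 < x by omega]

theorem int2bin_pos (x : Int) (h : 0 < x) : int2bin x = int2bin (x / 2) ++ [x % 2] := by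
  rw [int2bin]
  simp [h, PySem.Int.floordiv_eq_ediv_of_pos (show (0:Int) < 2 by norm_num),
        PySem.Int.mod_eq_emod_of_pos (show (0:Int) < 2 by norm_num)]

theorem int2bin_len_pos (x : Int) (h : 0 < x) : 1 ≤ (int2bin x).length := by
  rw [int2bin_pos x h]; simp

theorem int2bin_quad (x : Int) (h : 4 ≤ x) :
    int2bin x = int2bin (x / 4) ++ [(x % 4) / 2, (x % 4) % 2] := by
  rw [int2bin_pos x (by omega), int2bin_pos (x / 2) (by omega)]
  have h1 : x / 2 / 2 = x / 4 := by omega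
  have h2 : x / 2 % 2 = (x % 4) / 2 := by omega
  have h3 : x % 2 = (x % 4) % 2 := by omega
  rw [h1, h2, h3, List.append_assoc]
  rfl

theorem pad_len (m : Nat) (x : Int) (h : (int2bin x).length ≤ m) : (pad m x).length = m := by
  simp [pad]; omega

theorem pad_quad (k : Nat) (x : Int) (hx : 0 ≤ x) (hlen : (int2bin x).length ≤ 2*k+2) :
    pad (2*k+2) x = pad (2*k) (x/4) ++ [(x % 4) / 2, (x % 4) % 2] ∧
    (int2bin (x/4)).length ≤ 2*k := by
  by_cases h4 : 4 ≤ x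
  · have hq := int2bin_quad x h4
    have hl : (int2bin x).length = (int2bin (x/4)).length + 2 := by rw [hq]; simp
    constructor
    · rw [pad, pad, hq]
      have hc : 2*k+2 - (int2bin (x/4) ++ [(x % 4) / 2, (x % 4) % 2]).length
          = 2*k - (int2bin (x/4)).length := by
        simp only [List.length_append, List.length_cons, List.length_nil]
        omega
      rw [hc, ← List.append_assoc]
    · omega
  · have hx4 : x / 4 = 0 := by omega
    have hnil : int2bin (x/4) = [] := by rw [hx4]; exact int2bin_nonpos 0 (by norm_num)
    refine ⟨?_, by rw [hnil]; simp⟩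
    rw [pad, pad, hnil]
    simp only [List.length_nil, Nat.sub_zero, List.append_nil]
    have e0 : int2bin 0 = [] := int2bin_nonpos 0 (by norm_num)
    have e1 : int2bin 1 = [1] := by rw [int2bin_pos 1 (by norm_num)]; norm_num [e0]
    have e2 : int2bin 2 = [1, 0] := by rw [int2bin_pos 2 (by norm_num)]; norm_num [e1]
    have e3 : int2bin 3 = [1, 1] := by rw [int2bin_pos 3 (by norm_num)]; norm_num [e1]
    have r2 : ∀ j : Nat, List.replicate (j+2) (0:Int) = List.replicate j 0 ++ [0, 0] := by
      intro j; rw [List.replicate_add]; rfl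
    have r1 : ∀ j : Nat, List.replicate (j+1) (0:Int) ++ [(1:Int)]
        = List.replicate j 0 ++ [0, 1] := by
      intro j; rw [List.replicate_succ', List.append_assoc]; rfl
    have hc : x = 0 ∨ x = 1 ∨ x = 2 ∨ x = 3 := by omega
    rcases hc with h | h | h | h <;> subst h
    · rw [e0]; norm_num [r2 (2*k)]
    · rw [e1]; norm_num [show 2*k+2-1 = 2*k+1 by omega, r1 (2*k)]
    · rw [e2]; norm_num [show 2*k+2-2 = 2*k by omega]
    · rw [e3]; norm_num [show 2*k+2-2 = 2*k by omega]

theorem slice_prefix (q t : List Int) (ii : Int) (h0 : 0 ≤ ii)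
    (h : (ii*2).toNat + 2 ≤ q.length) :
    PySem.List.slice (q ++ t) (some (ii*2)) (some (ii*2+2)) =
    PySem.List.slice q (some (ii*2)) (some (ii*2+2)) := by
  rw [PySem.List.slice_toNat (q ++ t) (by omega) (by omega),
      PySem.List.slice_toNat q (by omega) (by omega)]
  rw [List.drop_append_of_le_length (by omega)]
  rw [List.take_append_of_le_length (by simp; omega)]

theorem slice_last (q t : List Int) (k : Nat) (hq : q.length = 2*k) (ht : t.length = 2) :
    PySem.List.slice (q ++ t) (some ((k:Int)*2)) (some ((k:Int)*2+2)) = t := by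
  rw [PySem.List.slice_toNat (q ++ t) (by omega) (by omega)]
  rw [show ((k:Int)*2+2).toNat - ((k:Int)*2).toNat = 2 by omega]
  rw [show ((k:Int)*2).toNat = q.length by omega]
  rw [List.drop_left]
  exact List.take_of_length_le (by omega)

-- the if-chain of A's loop body on one digit pair equals B's table f4
theorem chain_eq_f4 (d1 d2 acc : Int) (h1 : 0 ≤ d1) (h2 : d1 < 4) (h3 : 0 ≤ d2) (h4 : d2 < 4) :
    (if ([d1/2, d1%2] : List Int) = [0,1] ∧ ([d2/2, d2%2] : List Int) = [1,0] then acc + 1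
     else if ([d1/2, d1%2] : List Int) = [1,0] ∧ ([d2/2, d2%2] : List Int) = [1,1] then acc + 1
     else if ([d1/2, d1%2] : List Int) = [1,1] ∧ ([d2/2, d2%2] : List Int) = [0,1] then acc + 1
     else if ([d1/2, d1%2] : List Int) = [1,0] ∧ ([d2/2, d2%2] : List Int) = [0,1] then acc + 3
     else if ([d1/2, d1%2] : List Int) = [1,1] ∧ ([d2/2, d2%2] : List Int) = [1,0] then acc + 3
     else if ([d1/2, d1%2] : List Int) = [0,1] ∧ ([d2/2, d2%2] : List Int) = [1,1] then acc + 3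
     else acc) = acc + f4 d1 d2 := by
  have e1 : d1 = 0 ∨ d1 = 1 ∨ d1 = 2 ∨ d1 = 3 := by omega
  have e2 : d2 = 0 ∨ d2 = 1 ∨ d2 = 2 ∨ d2 = 3 := by omega
  rcases e1 with h | h | h | h <;> subst h <;>
    rcases e2 with h | h | h | h <;> subst h <;>
    norm_num [f4, PySem.Int.mod_eq_emod_of_pos (show (0:Int) < 3 by norm_num)]

theorem altGo_base (p1 p2 c : Int) (h : ¬ (0 < p1 ∨ 0 < p2)) : altGo p1 p2 c = c := by
  rw [altGo]; simp [h]

theorem altGo_pos (p1 p2 c : Int) (h : 0 < p1 ∨ 0 < p2) :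
    altGo p1 p2 c = altGo (PySem.Int.floordiv p1 4) (PySem.Int.floordiv p2 4)
      (if PySem.Int.mod p1 4 ≠ 0 ∧ PySem.Int.mod p2 4 ≠ 0 ∧ PySem.Int.mod p1 4 ≠ PySem.Int.mod p2 4
       then c + (if PySem.Int.mod (PySem.Int.mod p2 4 - PySem.Int.mod p1 4) 3 = 1 then 1 else 3)
       else c) := by
  conv_lhs => rw [altGo]
  simp [h]

theorem altGo_acc (N : Nat) : ∀ p1 p2 : Int, p1.toNat + p2.toNat ≤ N →
    ∀ c d, altGo p1 p2 (c + d) = c + altGo p1 p2 d := by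
  induction N with
  | zero =>
    intro p1 p2 hN c d
    have h : ¬ (0 < p1 ∨ 0 < p2) := by omega
    rw [altGo_base _ _ _ h, altGo_base _ _ _ h]
  | succ n ih =>
    intro p1 p2 hN c d
    by_cases h : 0 < p1 ∨ 0 < p2
    · have hd : (PySem.Int.floordiv p1 4).toNat + (PySem.Int.floordiv p2 4).toNat ≤ n := by
        rw [PySem.Int.floordiv_eq_ediv_of_pos (show (0:Int) < 4 by norm_num),
            PySem.Int.floordiv_eq_ediv_of_pos (show (0:Int) < 4 by norm_num)]
        omega
      rw [altGo_pos p1 p2 (c + d) h, altGo_pos p1 p2 d h]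
      split_ifs with hC hD
      · rw [show c + d + (1:Int) = c + (d + 1) from by ring]
        exact ih _ _ hd c (d + 1)
      · rw [show c + d + (3:Int) = c + (d + 3) from by ring]
        exact ih _ _ hd c (d + 3)
      · exact ih _ _ hd c d
    · rw [altGo_base _ _ _ h, altGo_base _ _ _ h]

theorem altGo_acc' (p1 p2 c : Int) : altGo p1 p2 c = c + altGo p1 p2 0 := by
  have h := altGo_acc (p1.toNat + p2.toNat) p1 p2 le_rfl c 0
  simpa using h

theorem altGo_step (p1 p2 : Int) (hp1 : 0 ≤ p1) (hp2 : 0 ≤ p2) :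
    altGo p1 p2 0 = f4 (PySem.Int.mod p1 4) (PySem.Int.mod p2 4) +
      altGo (PySem.Int.floordiv p1 4) (PySem.Int.floordiv p2 4) 0 := by
  by_cases h : 0 < p1 ∨ 0 < p2
  · rw [altGo_pos p1 p2 0 h, altGo_acc']
    unfold f4
    split_ifs <;> ring
  · have e1 : p1 = 0 := by omega
    have e2 : p2 = 0 := by omega
    subst e1; subst e2
    rw [altGo_base 0 0 0 (by norm_num)]
    rw [show PySem.Int.floordiv 0 4 = 0 from by decide, altGo_base 0 0 0 (by norm_num)]
    rw [show PySem.Int.mod 0 4 = 0 from by decide]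
    rw [show f4 0 0 = 0 from by decide]
    norm_num

theorem main_loop (k : Nat) : ∀ x y : Int, 0 ≤ x → 0 ≤ y →
    (int2bin x).length ≤ 2*k → (int2bin y).length ≤ 2*k →
    (PySem.List.pyRange 0 (k:Int) 1).foldl (pauliSliceStep (pad (2*k) x) (pad (2*k) y)) 0 =
      altGo x y 0 := by
  induction k with
  | zero =>
    intro x y hx hy hlx hly
    have hx0 : x = 0 := by
      by_contra hne
      have := int2bin_len_pos x (by omega)
      omega
    have hy0 : y = 0 := by
      by_contra hne
      have := int2bin_len_pos y (by omega)
      omega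
    subst hx0; subst hy0
    rw [PySem.List.pyRange_one_eq_nil (by norm_num), altGo_base 0 0 0 (by norm_num)]
    rfl
  | succ k ih =>
    intro x y hx hy hlx hly
    rw [show 2*(k+1) = 2*k+2 from by ring] at hlx hly ⊢
    obtain ⟨hpx, hlx'⟩ := pad_quad k x hx hlx
    obtain ⟨hpy, hly'⟩ := pad_quad k y hy hly
    have hx4 : (0:Int) ≤ x / 4 := Int.ediv_nonneg hx (by norm_num)
    have hy4 : (0:Int) ≤ y / 4 := Int.ediv_nonneg hy (by norm_num)
    have hlen1 : (pad (2*k) (x/4)).length = 2*k := pad_len _ _ hlx'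
    have hlen2 : (pad (2*k) (y/4)).length = 2*k := pad_len _ _ hly'
    rw [hpx, hpy]
    rw [show ((k+1 : Nat) : Int) = ((k : Nat) : Int) + 1 from by push_cast; ring]
    rw [PySem.List.pyRange_one_succ_right (by positivity), List.foldl_append]
    have hcongr : (PySem.List.pyRange 0 (k:Int) 1).foldl
        (pauliSliceStep (pad (2*k) (x/4) ++ [(x % 4) / 2, (x % 4) % 2])
                        (pad (2*k) (y/4) ++ [(y % 4) / 2, (y % 4) % 2])) 0 =
        (PySem.List.pyRange 0 (k:Int) 1).foldl
          (pauliSliceStep (pad (2*k) (x/4)) (pad (2*k) (y/4))) 0 := by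
      apply PySem.List.foldl_congr_mem
      intro acc ii hii
      obtain ⟨h0, hlt⟩ := (PySem.List.mem_pyRange_one).1 hii
      unfold pauliSliceStep
      rw [slice_prefix _ _ ii h0 (by omega), slice_prefix _ _ ii h0 (by omega)]
    rw [hcongr, ih (x/4) (y/4) hx4 hy4 hlx' hly']
    simp only [List.foldl_cons, List.foldl_nil]
    unfold pauliSliceStep
    rw [slice_last _ _ k hlen1 rfl, slice_last _ _ k hlen2 rfl]
    rw [chain_eq_f4 (x % 4) (y % 4) _ (by omega) (by omega) (by omega) (by omega)]
    rw [altGo_step x y hx hy]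
    simp only [PySem.Int.floordiv_eq_ediv_of_pos (show (0:Int) < 4 by norm_num),
               PySem.Int.mod_eq_emod_of_pos (show (0:Int) < 4 by norm_num)]
    ring

theorem bridge (x y : Int) (hx : 0 ≤ x) (hy : 0 ≤ y) :
    (PySem.List.pyRange 0
        (PySem.Int.floordiv
          (PySem.Int.floordiv (max ((int2bin x).length : Int) ((int2bin y).length : Int) + 1) 2 * 2) 2) 1).foldl
      (pauliSliceStep
        (List.replicate ((PySem.Int.floordiv (max ((int2bin x).length : Int) ((int2bin y).length : Int) + 1) 2 * 2
            - ((int2bin x).length : Int)).toNat) 0 ++ int2bin x)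
        (List.replicate ((PySem.Int.floordiv (max ((int2bin x).length : Int) ((int2bin y).length : Int) + 1) 2 * 2
            - ((int2bin y).length : Int)).toNat) 0 ++ int2bin y)) 0 = altGo x y 0 := by
  set a := (int2bin x).length with ha
  set b := (int2bin y).length with hb
  set k := (max a b + 1) / 2 with hk
  have h2 : PySem.Int.floordiv (max (a:Int) (b:Int) + 1) 2 * 2 = ((2*k : Nat) : Int) := by
    rw [PySem.Int.floordiv_eq_ediv_of_pos (show (0:Int) < 2 by norm_num)]
    omega
  rw [h2]
  rw [show PySem.Int.floordiv ((2*k : Nat) : Int) 2 = ((k : Nat) : Int) from by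
    rw [PySem.Int.floordiv_eq_ediv_of_pos (show (0:Int) < 2 by norm_num)]; omega]
  rw [show (((2*k : Nat) : Int) - (a:Int)).toNat = 2*k - a from by omega]
  rw [show (((2*k : Nat) : Int) - (b:Int)).toNat = 2*k - b from by omega]
  exact main_loop k x y hx hy (by omega) (by omega)

-- ===== VERDICT (by name: the statement is the Claim_ definition above) =====
theorem infer_phase_spec : Claim_equal_infer_phase := by
  unfold Claim_equal_infer_phase
  intro x y _hdom hpre
  obtain ⟨hx, hy⟩ := hpre
  unfold Spec_infer_phase infer_phase infer_phase_alt
  dsimp only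
  rw [bridge x y hx hy]
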